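-- pv_equiv track=rewrite | github.com/FlyingCheeseDemon/AdventOfCode24 | 21a.py | robot_12_input
-- ===== SOURCE A (Python) =====
-- DIRECTION_KEYPAD = [["","^","A"],["<","v",">"]]
--
-- DIRECTION_VALIDATION = [[False,True,True],[True,True,True]]
--
-- def get_character_position(grid,character):
--     for i in range(len(grid)):
--         for j in range(len(grid[i])):
--             if grid[i][j] == character:
--                 return [i,j]
--
-- DIRECTION_ARR = [[0,1],[1,0],[0,-1],[-1,0]]
--
-- def array_add(arr1,arr2):
--     output = [0] * len(arr1)
--     for i in range(len(arr1)):
--         output[i] = arr1[i] + arr2[i]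
--     return output
--
-- def validate_sequence(validation_grid,start,sequence):
--     if not validation_grid[start[0]][start[1]]:
--         return False
--     pos = start
--     for character in sequence:
--         if character == "<":
--             direction = DIRECTION_ARR[2]
--         elif character == ">":
--             direction = DIRECTION_ARR[0]
--         elif character == "^":
--             direction = DIRECTION_ARR[3]
--         elif character == "v":
--             direction = DIRECTION_ARR[1]
--         else:
--             return True
--
--         pos = array_add(pos,direction)
--         if not validation_grid[pos[0]][pos[1]]:
--             return False
--
-- def generate_candidate_sequences(start_pos,target_pos,validation_grid):
--     vertical = start_pos[0] - target_pos[0]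
--     down = vertical < 0
--     vertical = abs(vertical)
--     horizontal = start_pos[1] - target_pos[1]
--     left = horizontal > 0
--     horizontal = abs(horizontal)
--
--     vert_character = "v" if down else "^"
--     horiz_character = "<" if left else ">"
--     characters = [vert_character,horiz_character]
--     length_sequence = vertical + horizontal
--
--     sequences = []
--     for i in range(2**length_sequence):
--         combination = [int(num) for num in (bin(i)[2:])] # 0 is vertical, 1 is horizontal
--         while len(combination) < length_sequence:
--             combination = [0] + combination
--         if sum(combination) != horizontal:
--             continue
--         combination_symbols = [characters[inx] for inx in combination] + ["A"]
--         if validate_sequence(validation_grid,start_pos,combination_symbols):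
--             sequences.append(''.join(combination_symbols))
--     return sequences
--
-- def robot_12_input(robot_01_sequence):
--     robot_pos = get_character_position(DIRECTION_KEYPAD,"A")
--     sequences = []
--     for character in robot_01_sequence:
--         robot_target = get_character_position(DIRECTION_KEYPAD,character)
--         if all([robot_target[0] == robot_pos[0],robot_target[1] == robot_pos[1]]):
--             sequences.append(["A"])
--         else:
--             sequences.append(generate_candidate_sequences(robot_pos,robot_target,DIRECTION_VALIDATION))
--
--         robot_pos = robot_target
--     return sequences
-- ===== SOURCE B (Python) =====
-- KEY_POSITIONS = {"^": (0, 1), "A": (0, 2), "<": (1, 0), "v": (1, 1), ">": (1, 2)}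
-- VALID = [[False, True, True], [True, True, True]]
--
-- def _interleavings(vert_char, v, horiz_char, h):
--     # every arrangement of v vert_chars and h horiz_chars, vertical-first lexicographic order
--     if v == 0 and h == 0:
--         return [[]]
--     out = []
--     if v > 0:
--         out += [[vert_char] + rest for rest in _interleavings(vert_char, v - 1, horiz_char, h)]
--     if h > 0:
--         out += [[horiz_char] + rest for rest in _interleavings(vert_char, v, horiz_char, h - 1)]
--     return out
--
-- def _safe(start, seq):
--     r, c = start
--     for ch in seq:
--         if ch == "^":
--             r -= 1
--         elif ch == "v":
--             r += 1
--         elif ch == "<":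
--             c -= 1
--         elif ch == ">":
--             c += 1
--         if not VALID[r][c]:
--             return False
--     return True
--
-- def robot_12_input(robot_01_sequence):
--     pos = KEY_POSITIONS["A"]
--     result = []
--     for ch in robot_01_sequence:
--         target = KEY_POSITIONS[ch]
--         if target == pos:
--             result.append(["A"])
--         else:
--             dr = target[0] - pos[0]
--             dc = target[1] - pos[1]
--             vert = "v" if dr > 0 else "^"
--             horiz = ">" if dc > 0 else "<"
--             result.append([''.join(seq) + "A"
--                            for seq in _interleavings(vert, abs(dr), horiz, abs(dc))
--                            if _safe(pos, seq)])
--         pos = target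
--     return result
-- ===== Notes on version B (the rewrite author's own statement) =====
-- stated objective: alternative
-- what changed: Instead of enumerating all 2^(v+h) bitmasks and filtering by popcount, B recursively generates exactly the C(v+h,h) interleavings of the two move characters (in the same ascending-bitmask order) and checks validity by walking the grid position directly; key positions come from a literal dict instead of a grid scan.
import Mathlib
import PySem

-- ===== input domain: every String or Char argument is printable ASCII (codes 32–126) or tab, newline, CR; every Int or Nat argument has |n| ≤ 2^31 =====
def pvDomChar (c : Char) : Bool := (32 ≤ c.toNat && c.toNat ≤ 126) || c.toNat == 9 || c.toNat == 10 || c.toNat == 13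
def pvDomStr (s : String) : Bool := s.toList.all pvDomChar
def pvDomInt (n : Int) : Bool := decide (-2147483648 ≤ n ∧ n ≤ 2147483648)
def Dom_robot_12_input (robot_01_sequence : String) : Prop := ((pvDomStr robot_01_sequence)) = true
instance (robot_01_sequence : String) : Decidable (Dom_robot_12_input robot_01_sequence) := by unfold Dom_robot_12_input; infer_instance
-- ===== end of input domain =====

-- B replaces A's 2^n bitmask enumeration-with-popcount-filter by a direct recursive generation of
-- the C(v+h, h) interleavings in the same (ascending-bitmask) order: an alternative, asymptotically
-- smaller enumeration.


-- ===== PORT A =====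
def DIRECTION_KEYPAD : List (List String) := [["", "^", "A"], ["<", "v", ">"]]
def DIRECTION_VALIDATION : List (List Bool) := [[false, true, true], [true, true, true]]

-- nested for-loops of get_character_position, with explicit indices
def gcpRow (row : List String) (character : String) (j : Int) : Option Int :=
  match row with
  | [] => none
  | x :: rest => if x == character then some j else gcpRow rest character (j + 1)

def gcpGrid (grid : List (List String)) (character : String) (i : Int) : Option (List Int) :=
  match grid with
  | [] => none
  | row :: rest =>
    match gcpRow row character 0 with
    | some j => some [i, j]
    | none => gcpGrid rest character (i + 1)

def get_character_position (grid : List (List String)) (character : String) : Option (List Int) :=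
  gcpGrid grid character 0

def array_add (arr1 arr2 : List Int) : List Int :=
  (List.range arr1.length).map (fun i => arr1.getD i 0 + arr2.getD i 0)

-- validation_grid[p[0]][p[1]]; Python raises on an out-of-range index, which never happens on the
-- positions this file reaches, so `getD false` stands for the raising case
def vgAt (vg : List (List Bool)) (p : List Int) : Bool :=
  (PySem.List.pyGet? ((PySem.List.pyGet? vg (p.getD 0 0)).getD []) (p.getD 1 0)).getD false

-- validate_sequence returns False / True / None (loop fell through): Option Bool, none = fell through
def vsLoop (vg : List (List Bool)) (pos : List Int) (seq : List String) : Option Bool :=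
  match seq with
  | [] => none
  | c :: rest =>
    let dir? : Option (List Int) :=
      if c == "<" then some [0, -1]        -- DIRECTION_ARR[2]
      else if c == ">" then some [0, 1]    -- DIRECTION_ARR[0]
      else if c == "^" then some [-1, 0]   -- DIRECTION_ARR[3]
      else if c == "v" then some [1, 0]    -- DIRECTION_ARR[1]
      else none
    match dir? with
    | none => some true
    | some dir =>
      let pos' := array_add pos dir
      if ¬ vgAt vg pos' then some false else vsLoop vg pos' rest

def validate_sequence (vg : List (List Bool)) (start : List Int) (seq : List String) : Option Bool :=
  if ¬ vgAt vg start then some false else vsLoop vg start seq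

-- bin(i)[2:] as 0/1 digits, most significant first
def binDigits (i : Nat) : List Nat :=
  (Nat.toDigits 2 i).map (fun c => c.toNat - 48)

def padZeros (combination : List Nat) (n : Nat) : List Nat :=
  List.replicate (n - combination.length) 0 ++ combination

def generate_candidate_sequences (start_pos target_pos : List Int) (vg : List (List Bool)) :
    List String :=
  let vertical0 := start_pos.getD 0 0 - target_pos.getD 0 0
  let down := vertical0 < 0
  let vertical := vertical0.natAbs
  let horizontal0 := start_pos.getD 1 0 - target_pos.getD 1 0
  let left := horizontal0 > 0
  let horizontal := horizontal0.natAbs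
  let vert_character := if down then "v" else "^"
  let horiz_character := if left then "<" else ">"
  let characters := [vert_character, horiz_character]
  let length_sequence := vertical + horizontal
  (List.range (2 ^ length_sequence)).foldl
    (fun sequences i =>
      let combination := padZeros (binDigits i) length_sequence
      if combination.sum ≠ horizontal then sequences
      else
        let combination_symbols := combination.map (fun inx => characters.getD inx "") ++ ["A"]
        if validate_sequence vg start_pos combination_symbols = some true then
          sequences ++ [String.join combination_symbols]
        else sequences)
    []

-- loop body of robot_12_input; the `none` branch is Python's TypeError (key not on the pad),
-- excluded by Pre_
def stepA (st : List Int × List (List String)) (c : Char) : List Int × List (List String) :=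
  let (robot_pos, sequences) := st
  match get_character_position DIRECTION_KEYPAD (String.ofList [c]) with
  | none => (robot_pos, sequences)
  | some robot_target =>
    if robot_target.getD 0 0 == robot_pos.getD 0 0 ∧ robot_target.getD 1 0 == robot_pos.getD 1 0 then
      (robot_target, sequences ++ [["A"]])
    else
      (robot_target,
        sequences ++ [generate_candidate_sequences robot_pos robot_target DIRECTION_VALIDATION])

def robot_12_input (robot_01_sequence : String) : List (List String) :=
  let robot_pos := (get_character_position DIRECTION_KEYPAD "A").getD []
  (robot_01_sequence.toList.foldl stepA (robot_pos, [])).2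

-- ===== PORT B =====
def KEY_POSITIONS : PySem.Dict String (Int × Int) :=
  PySem.Dict.ofList [("^", (0, 1)), ("A", (0, 2)), ("<", (1, 0)), ("v", (1, 1)), (">", (1, 2))]
def VALID : List (List Bool) := [[false, true, true], [true, true, true]]

-- _interleavings: vertical-first lexicographic enumeration of the C(v+h,h) arrangements
-- structural recursion on fuel = v + h (a totality device only; the branches are Source B's)
def interleavingsF (vc hc : String) : Nat → Nat → Nat → List (List String)
  | _, 0, 0 => [[]]
  | 0, _, _ => []  -- fuel exhausted: never reached, fuel starts at v + h
  | f + 1, v, h =>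
    (if v > 0 then (interleavingsF vc hc f (v - 1) h).map (vc :: ·) else []) ++
      (if h > 0 then (interleavingsF vc hc f v (h - 1)).map (hc :: ·) else [])

def interleavings (vc hc : String) (v h : Nat) : List (List String) :=
  interleavingsF vc hc (v + h) v h

-- VALID[r][c]; out of range never happens on reached positions, `getD false` stands for the raise
def validAt (r c : Int) : Bool :=
  (PySem.List.pyGet? ((PySem.List.pyGet? VALID r).getD []) c).getD false

def safe (start : Int × Int) (seq : List String) : Bool :=
  match seq with
  | [] => true
  | ch :: rest =>
    let p :=
      if ch == "^" then (start.1 - 1, start.2)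
      else if ch == "v" then (start.1 + 1, start.2)
      else if ch == "<" then (start.1, start.2 - 1)
      else if ch == ">" then (start.1, start.2 + 1)
      else start
    if ¬ validAt p.1 p.2 then false else safe p rest

-- loop body of B's robot_12_input; `none` branch is Python's KeyError, excluded by Pre_
def stepB (st : (Int × Int) × List (List String)) (ch : Char) : (Int × Int) × List (List String) :=
  let (pos, result) := st
  match PySem.Dict.get? KEY_POSITIONS (String.ofList [ch]) with
  | none => (pos, result)
  | some target =>
    if target = pos then (target, result ++ [["A"]])
    else
      let dr := target.1 - pos.1
      let dc := target.2 - pos.2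
      let vert := if dr > 0 then "v" else "^"
      let horiz := if dc > 0 then ">" else "<"
      (target,
        result ++
          [((interleavings vert horiz dr.natAbs dc.natAbs).filter (fun seq => safe pos seq)).map
              (fun seq => String.join seq ++ "A")])

def robot_12_input_alt (robot_01_sequence : String) : List (List String) :=
  (robot_01_sequence.toList.foldl stepB ((0, 2), [])).2

-- ===== PRECONDITION & SPEC =====
-- Pre_ excludes exactly the strings containing a character not on the direction keypad, on which
-- Python A raises TypeError (get_character_position returns None and None[0] is taken).
def Pre_robot_12_input (robot_01_sequence : String) : Prop :=
  (robot_01_sequence.toList.all (fun c => c ∈ ['^', 'A', '<', 'v', '>'])) = true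
instance (robot_01_sequence : String) : Decidable (Pre_robot_12_input robot_01_sequence) := by
  unfold Pre_robot_12_input; infer_instance

def pvWitness_robot_12_input : String := "<^A>v"

def Spec_robot_12_input (robot_01_sequence : String) (out : List (List String)) : Prop :=
  out = robot_12_input_alt robot_01_sequence
instance (robot_01_sequence : String) (out : List (List String)) :
    Decidable (Spec_robot_12_input robot_01_sequence out) := by
  unfold Spec_robot_12_input; infer_instance

-- ===== CLAIM (what is proved, stated in full; the proofs are below) =====
def Claim_equal_robot_12_input : Prop :=
  ∀ (robot_01_sequence : String), Dom_robot_12_input robot_01_sequence →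
    Pre_robot_12_input robot_01_sequence →
      Spec_robot_12_input robot_01_sequence (robot_12_input robot_01_sequence)

-- ===== LEMMAS AND PROOFS =====
def keyChars : List Char := ['^', 'A', '<', 'v', '>']
def keyPosList : List (Int × Int) := [(0, 1), (0, 2), (1, 0), (1, 1), (1, 2)]

-- the accumulator is only appended to
theorem stepA_acc (pos : List Int) (acc : List (List String)) (c : Char) :
    stepA (pos, acc) c = ((stepA (pos, []) c).1, acc ++ (stepA (pos, []) c).2) := by
  unfold stepA
  cases get_character_position DIRECTION_KEYPAD (String.ofList [c])
  · simp
  · simp only []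
    split <;> simp

theorem stepB_acc (pos : Int × Int) (acc : List (List String)) (c : Char) :
    stepB (pos, acc) c = ((stepB (pos, []) c).1, acc ++ (stepB (pos, []) c).2) := by
  unfold stepB
  cases PySem.Dict.get? KEY_POSITIONS (String.ofList [c])
  · simp
  · simp only []
    split <;> simp

-- on every keypad position and keypad character the two loop bodies agree (25 concrete cases)
theorem step_agree : ∀ p ∈ keyPosList, ∀ c ∈ keyChars,
    (stepA ([p.1, p.2], []) c).1 = [(stepB (p, []) c).1.1, (stepB (p, []) c).1.2] ∧
    (stepA ([p.1, p.2], []) c).2 = (stepB (p, []) c).2 ∧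
    (stepB (p, []) c).1 ∈ keyPosList := by
  intro p hp c hc
  fin_cases hp <;> fin_cases hc <;> decide

theorem fold_agree (l : List Char) (hl : ∀ c ∈ l, c ∈ keyChars) :
    ∀ (p : Int × Int), p ∈ keyPosList → ∀ (acc : List (List String)),
      (l.foldl stepA ([p.1, p.2], acc)).2 = (l.foldl stepB (p, acc)).2 := by
  induction l with
  | nil => intro p _ acc; simp
  | cons c rest ih =>
    intro p hp acc
    have hc : c ∈ keyChars := hl c (by simp)
    have hrest : ∀ c ∈ rest, c ∈ keyChars := fun x hx => hl x (by simp [hx])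
    obtain ⟨h1, h2, h3⟩ := step_agree p hp c hc
    simp only [List.foldl_cons]
    rw [stepA_acc, stepB_acc, h1, h2]
    exact ih hrest _ h3 _


-- ===== VERDICT (by name: the statement is the Claim_ definition above) =====
theorem robot_12_input_spec : Claim_equal_robot_12_input := by
  intro s _ hpre
  unfold Pre_robot_12_input at hpre
  simp only [List.all_eq_true, decide_eq_true_eq] at hpre
  unfold Spec_robot_12_input robot_12_input robot_12_input_alt
  have h0 : ((get_character_position DIRECTION_KEYPAD "A").getD [] : List Int) = [0, 2] := by decide
  rw [h0]
  exact fold_agree s.toList (fun c hc => hpre c hc) (0, 2) (by decide) []
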